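-- pv_equiv track=rewrite | github.com/htayaung-data/erpnext-ai-agent | impl_factory/05_custom_logic/custom_app/ai_assistant_ui/ai_assistant_ui/ai_core/fac/normalize.py | pick_total_field
-- ===== SOURCE A (Python) =====
-- from typing import Any, Dict, List, Optional, Tuple
--
-- def pick_total_field(columns: List[Dict[str, Any]]) -> Optional[str]:
--     """
--     Heuristic: pick a "total" numeric field from columns.
--     Used by summary / top-N style tools.
--     """
--     if not columns:
--         return None
--
--     # strong candidates
--     preferred = {
--         "total", "grand_total", "base_grand_total",
--         "outstanding_amount", "outstanding",
--         "balance", "amount", "net_total",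
--     }
--
--     for c in columns:
--         fn = (c.get("fieldname") or "").strip()
--         if fn.lower() in preferred:
--             return fn
--
--     # any field containing 'total'
--     for c in columns:
--         fn = (c.get("fieldname") or "").strip()
--         if "total" in fn.lower():
--             return fn
--
--     # fallback: last column fieldname
--     return (columns[-1].get("fieldname") or "").strip() or None
-- ===== SOURCE B (Python) =====
-- from typing import Any, Dict, List, Optional
--
-- def pick_total_field(columns: List[Dict[str, Any]]) -> Optional[str]:
--     if not columns:
--         return None
--     preferred = {
--         "total", "grand_total", "base_grand_total",
--         "outstanding_amount", "outstanding",
--         "balance", "amount", "net_total",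
--     }
--
--     def rank(fn: str) -> int:
--         low = fn.lower()
--         if low in preferred:
--             return 0
--         if "total" in low:
--             return 1
--         return 2
--
--     fns = [(c.get("fieldname") or "").strip() for c in columns]
--     best_i, best_fn = min(enumerate(fns), key=lambda p: (rank(p[1]), p[0]))
--     if rank(best_fn) < 2:
--         return best_fn
--     return fns[-1] or None
-- ===== Notes on version B (the rewrite author's own statement) =====
-- stated objective: alternative
-- what changed: Replaced A's two sequential scans by a rank function (0 = preferred name, 1 = contains 'total', 2 = other) and a single argmin over the enumerated fieldnames with key (rank, index); the winner is returned if its rank beats 2, else the last-fieldname fallback.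
import Mathlib
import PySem

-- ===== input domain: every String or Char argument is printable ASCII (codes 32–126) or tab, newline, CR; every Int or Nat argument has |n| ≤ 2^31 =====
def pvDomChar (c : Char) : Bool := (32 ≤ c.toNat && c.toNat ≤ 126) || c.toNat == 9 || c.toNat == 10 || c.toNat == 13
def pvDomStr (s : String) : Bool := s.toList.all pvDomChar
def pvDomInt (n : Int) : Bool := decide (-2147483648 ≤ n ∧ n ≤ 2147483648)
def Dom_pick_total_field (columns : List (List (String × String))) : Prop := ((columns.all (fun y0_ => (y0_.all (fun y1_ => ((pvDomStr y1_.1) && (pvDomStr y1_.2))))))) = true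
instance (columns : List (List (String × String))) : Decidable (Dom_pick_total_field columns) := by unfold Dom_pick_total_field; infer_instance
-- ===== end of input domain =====

-- B replaces A's two sequential scans by a rank (0 preferred / 1 contains 'total' / 2 other)
-- and one argmin over the enumerated fieldnames; objective: alternative (same cost).

-- shared value computations of both sources:
-- fn = (c.get("fieldname") or "").strip()
def pvFieldname (c : List (String × String)) : String :=
  PySem.Str.strip (((PySem.Dict.mk c).get? "fieldname").getD "")

def pvPreferred : List String :=
  ["total", "grand_total", "base_grand_total",
   "outstanding_amount", "outstanding",
   "balance", "amount", "net_total"]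

-- ===== PORT A =====
-- first loop of A: first column whose lowered fieldname is in `preferred`
def pickPrefLoop : List (List (String × String)) → Option String
  | [] => none
  | c :: rest =>
    let fn := pvFieldname c
    if pvPreferred.contains (PySem.Str.lower fn) then some fn else pickPrefLoop rest

-- second loop of A: first column whose lowered fieldname contains "total"
def pickTotalLoop : List (List (String × String)) → Option String
  | [] => none
  | c :: rest =>
    let fn := pvFieldname c
    if PySem.Str.isIn "total" (PySem.Str.lower fn) then some fn else pickTotalLoop rest

def pick_total_field (columns : List (List (String × String))) : Option String :=
  if columns = [] then none
  else
    match pickPrefLoop columns with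
    | some fn => some fn
    | none =>
      match pickTotalLoop columns with
      | some fn => some fn
      | none =>
        -- return (columns[-1].get("fieldname") or "").strip() or None
        match PySem.List.pyGet? columns (-1) with
        | some c => let fn := pvFieldname c; if fn = "" then none else some fn
        | none => none

-- ===== PORT B =====
-- rank(fn): 0 preferred, 1 contains 'total', 2 other
def rankB (fn : String) : Nat :=
  let low := PySem.Str.lower fn
  if pvPreferred.contains low then 0
  else if PySem.Str.isIn "total" low then 1
  else 2

-- min(enumerate(fns), key=lambda p: (rank(p[1]), p[0])): running first-minimum
-- of the lexicographic key (rank, index), seeded with the first pair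
def bestLoop : List (Int × String) → Nat × Int × String → Nat × Int × String
  | [], b => b
  | (i, fn) :: rest, b =>
    bestLoop rest
      (if rankB fn < b.1 ∨ (rankB fn = b.1 ∧ i < b.2.1) then (rankB fn, i, fn) else b)

def pick_total_field_alt (columns : List (List (String × String))) : Option String :=
  if columns = [] then none
  else
    let fns := columns.map pvFieldname
    match PySem.List.enumerate fns with
    | [] => none   -- unreachable: columns (hence fns) is nonempty here
    | p :: ps =>
      let best := bestLoop ps (rankB p.2, p.1, p.2)
      if best.1 < 2 then some best.2.2
      else
        -- return fns[-1] or None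
        match PySem.List.pyGet? fns (-1) with
        | some fn => if fn = "" then none else some fn
        | none => none

-- ===== PRECONDITION & SPEC =====
def Spec_pick_total_field (columns : List (List (String × String))) (out : Option String) : Prop := out = pick_total_field_alt columns
instance (columns : List (List (String × String))) (out : Option String) : Decidable (Spec_pick_total_field columns out) := by unfold Spec_pick_total_field; infer_instance

-- ===== CLAIM (what is proved, stated in full; the proofs are below) =====
def Claim_equal_pick_total_field : Prop := ∀ (columns : List (List (String × String))), Dom_pick_total_field columns → Spec_pick_total_field columns (pick_total_field columns)

-- ===== LEMMAS AND PROOFS =====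

-- index-free projection of bestLoop's state
def imp2 : List String → Nat × String → Nat × String
  | [], b => b
  | fn :: rest, b => imp2 rest (if rankB fn < b.1 then (rankB fn, fn) else b)

-- indices in the remaining enumeration are all strictly above the stored index,
-- so the lexicographic tie-break never fires: bestLoop projects to imp2
theorem bestLoop_proj (fns : List String) (s : Int) (r : Nat) (i : Int) (f : String)
    (hi : i < s) :
    ((bestLoop (PySem.List.enumerate fns s) (r, i, f)).1,
     (bestLoop (PySem.List.enumerate fns s) (r, i, f)).2.2) = imp2 fns (r, f) := by
  induction fns generalizing s r i f with
  | nil => rfl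
  | cons fn rest ih =>
    rw [PySem.List.enumerate_cons]
    simp only [bestLoop, imp2]
    by_cases h : rankB fn < r
    · rw [if_pos (Or.inl h), if_pos h]
      exact ih (s + 1) _ s fn (by omega)
    · rw [if_neg (by rintro (h' | ⟨_, h'⟩) <;> omega), if_neg h]
      exact ih (s + 1) r i f (by omega)

theorem imp2_zero (fns : List String) (f : String) : imp2 fns (0, f) = (0, f) := by
  induction fns with
  | nil => rfl
  | cons fn rest ih => simp [imp2, ih]

theorem imp2_one (cols : List (List (String × String))) (f : String) :
    imp2 (cols.map pvFieldname) (1, f) =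
      (match pickPrefLoop cols with
       | some g => (0, g)
       | none => (1, f)) := by
  induction cols with
  | nil => rfl
  | cons c rest ih =>
    by_cases hp : PySem.Str.lower (pvFieldname c) ∈ pvPreferred
    · simp [imp2, pickPrefLoop, rankB, hp, imp2_zero]
    · by_cases ht : PySem.Chars.isIn ['t','o','t','a','l'] (PySem.Chars.lower (pvFieldname c).toList) = true
      · simp [imp2, pickPrefLoop, rankB, hp, ht, ih]
      · simp [imp2, pickPrefLoop, rankB, hp, ht, ih]

theorem imp2_two (cols : List (List (String × String))) (f : String) :
    imp2 (cols.map pvFieldname) (2, f) =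
      (match pickPrefLoop cols with
       | some g => (0, g)
       | none =>
         match pickTotalLoop cols with
         | some g => (1, g)
         | none => (2, f)) := by
  induction cols with
  | nil => rfl
  | cons c rest ih =>
    by_cases hp : PySem.Str.lower (pvFieldname c) ∈ pvPreferred
    · simp [imp2, pickPrefLoop, rankB, hp, imp2_zero]
    · by_cases ht : PySem.Chars.isIn ['t','o','t','a','l'] (PySem.Chars.lower (pvFieldname c).toList) = true
      · simp [imp2, pickPrefLoop, pickTotalLoop, rankB, hp, ht, imp2_one]
      · simp [imp2, pickPrefLoop, pickTotalLoop, rankB, hp, ht, ih]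

-- ===== VERDICT (by name: the statement is the Claim_ definition above) =====
theorem pick_total_field_spec : Claim_equal_pick_total_field := by
  intro columns _
  unfold Spec_pick_total_field pick_total_field pick_total_field_alt
  cases columns with
  | nil => rfl
  | cons c rest =>
    rw [if_neg (List.cons_ne_nil c rest), if_neg (List.cons_ne_nil c rest)]
    simp only [List.map_cons, PySem.List.enumerate_cons, zero_add]
    have hproj := bestLoop_proj (rest.map pvFieldname) 1 (rankB (pvFieldname c)) 0
      (pvFieldname c) (by omega)
    have h1 := congrArg Prod.fst hproj
    have h2 := congrArg Prod.snd hproj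
    simp only at h1 h2
    by_cases hp : PySem.Str.lower (pvFieldname c) ∈ pvPreferred
    · have hr : rankB (pvFieldname c) = 0 := by simp [rankB, hp]
      rw [hr, imp2_zero] at h1 h2
      simp [pickPrefLoop, hp, hr, h1, h2]
    · by_cases ht : PySem.Chars.isIn ['t','o','t','a','l'] (PySem.Chars.lower (pvFieldname c).toList) = true
      · have hr : rankB (pvFieldname c) = 1 := by simp [rankB, hp, ht]
        rw [hr, imp2_one] at h1 h2
        cases hpl : pickPrefLoop rest with
        | some g =>
          rw [hpl] at h1 h2; simp only at h1 h2
          simp [pickPrefLoop, hp, hpl, hr, h1, h2]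
        | none =>
          rw [hpl] at h1 h2; simp only at h1 h2
          simp [pickPrefLoop, pickTotalLoop, hp, ht, hpl, hr, h1, h2]
      · have hr : rankB (pvFieldname c) = 2 := by simp [rankB, hp, ht]
        rw [hr, imp2_two] at h1 h2
        cases hpl : pickPrefLoop rest with
        | some g =>
          rw [hpl] at h1 h2; simp only at h1 h2
          simp [pickPrefLoop, hp, hpl, hr, h1, h2]
        | none =>
          cases htl : pickTotalLoop rest with
          | some g =>
            rw [hpl, htl] at h1 h2; simp only at h1 h2
            simp [pickPrefLoop, pickTotalLoop, hp, ht, hpl, htl, hr, h1, h2]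
          | none =>
            rw [hpl, htl] at h1 h2; simp only at h1 h2
            rw [hr, if_neg (by rw [h1]; omega)]
            simp only [pickPrefLoop, pickTotalLoop]
            rw [if_neg (by simpa using hp), if_neg (by simpa using ht), hpl, htl]
            rw [PySem.List.pyGet?_neg_one, PySem.List.pyGet?_neg_one, ← List.map_cons,
              List.getLast?_map]
            cases (c :: rest).getLast? <;> rfl
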